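-- pv_equiv track=rewrite | github.com/CUBOPLUS-BTC/satscore-cubo-tech | src/app/scoring/analyzer.py | _extract_timestamps
-- ===== SOURCE A (Python) =====
-- def _extract_timestamps(txs: list) -> tuple[int | None, int | None]:
--     """Return (first_seen, last_active) as Unix timestamps or None."""
--     timestamps = []
--     for tx in txs:
--         status = tx.get("status", {})
--         if status.get("confirmed") and status.get("block_time"):
--             timestamps.append(int(status["block_time"]))
--
--     if not timestamps:
--         return None, None
--
--     return min(timestamps), max(timestamps)
-- ===== SOURCE B (Python) =====
-- def _extract_timestamps(txs: list) -> tuple[int | None, int | None]: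
--     """Return (first_seen, last_active) as Unix timestamps or None."""
--     ts = sorted(
--         int(tx.get("status", {})["block_time"])
--         for tx in txs
--         if tx.get("status", {}).get("confirmed") and tx.get("status", {}).get("block_time")
--     )
--     if not ts:
--         return None, None
--     return ts[0], ts[-1]
-- ===== Notes on version B (the rewrite author's own statement) =====
-- stated objective: alternative
-- what changed: Instead of collecting a list and scanning it with min() and max(), B sorts the collected timestamps once and returns the first and last elements of the sorted list.
import Mathlib
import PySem

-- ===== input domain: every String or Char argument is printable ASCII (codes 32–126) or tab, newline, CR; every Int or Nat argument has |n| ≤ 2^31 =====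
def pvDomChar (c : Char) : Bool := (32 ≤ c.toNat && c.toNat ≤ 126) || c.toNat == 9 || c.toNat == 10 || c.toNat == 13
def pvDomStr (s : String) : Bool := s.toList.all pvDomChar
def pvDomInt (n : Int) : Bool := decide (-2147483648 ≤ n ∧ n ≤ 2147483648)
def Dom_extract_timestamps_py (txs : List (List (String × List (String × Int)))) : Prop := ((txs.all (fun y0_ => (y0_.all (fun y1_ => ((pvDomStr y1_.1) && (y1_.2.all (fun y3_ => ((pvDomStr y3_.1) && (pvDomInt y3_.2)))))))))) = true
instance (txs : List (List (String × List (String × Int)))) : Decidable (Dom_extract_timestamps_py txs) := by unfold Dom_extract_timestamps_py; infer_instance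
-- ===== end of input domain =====

-- B replaces A's list-collection followed by min()/max() scans by sorting the collected
-- timestamps once and reading off the first and last elements (objective: alternative).

-- ===== PORT A =====
-- Python truthiness of `status.get(k)` for an int-valued dict: None and 0 are falsy.
def pvTruthy (o : Option Int) : Bool := o.getD 0 != 0

-- tx.get("status", {}) as a dict (inner dicts are association lists; Dict.get? = first match)
def pvStatus (tx : List (String × List (String × Int))) : PySem.Dict String Int :=
  PySem.Dict.mk ((PySem.Dict.mk tx).getD "status" [])

def extract_timestamps_py (txs : List (List (String × List (String × Int)))) : Option Int × Option Int :=
  let timestamps := txs.foldl (fun acc tx =>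
    let s := pvStatus tx
    if pvTruthy (s.get? "confirmed") && pvTruthy (s.get? "block_time") then
      -- int(status["block_time"]): the guard guarantees the key is present, so getD 0 is exact
      acc ++ [(s.get? "block_time").getD 0]
    else acc) ([] : List Int)
  match timestamps with
  | [] => (none, none)
  | _ => (PySem.List.min? timestamps (fun x => x), PySem.List.max? timestamps (fun x => x))

-- ===== PORT B =====
-- the optional timestamp a single tx contributes (the genexpr's filter + int() coercion)
def pvTs (tx : List (String × List (String × Int))) : Option Int :=
  let s := pvStatus tx
  if pvTruthy (s.get? "confirmed") && pvTruthy (s.get? "block_time") then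
    some ((s.get? "block_time").getD 0)
  else none

def extract_timestamps_py_alt (txs : List (List (String × List (String × Int)))) : Option Int × Option Int :=
  let ts := PySem.List.sorted (txs.filterMap pvTs) (fun x => x)
  if ts.isEmpty then (none, none)        -- `if not ts: return None, None`
  else (ts.head?, ts.getLast?)           -- ts[0], ts[-1] on the guarded nonempty list

-- ===== PRECONDITION & SPEC =====
def Spec_extract_timestamps_py (txs : List (List (String × List (String × Int)))) (out : Option Int × Option Int) : Prop := out = extract_timestamps_py_alt txs
instance (txs : List (List (String × List (String × Int)))) (out : Option Int × Option Int) : Decidable (Spec_extract_timestamps_py txs out) := by unfold Spec_extract_timestamps_py; infer_instance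

-- ===== CLAIM (what is proved, stated in full; the proofs are below) =====
def Claim_equal_extract_timestamps_py : Prop := ∀ (txs : List (List (String × List (String × Int)))), Dom_extract_timestamps_py txs → Spec_extract_timestamps_py txs (extract_timestamps_py txs)

-- ===== LEMMAS AND PROOFS =====

theorem stepA_eq : (fun (acc : List Int) (tx : List (String × List (String × Int))) =>
      let s := pvStatus tx
      if pvTruthy (s.get? "confirmed") && pvTruthy (s.get? "block_time") then
        acc ++ [(s.get? "block_time").getD 0]
      else acc)
    = (fun acc tx => match pvTs tx with | some t => acc ++ [t] | none => acc) := by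
  funext acc tx
  simp only [pvTs]
  by_cases h : (pvTruthy ((pvStatus tx).get? "confirmed") && pvTruthy ((pvStatus tx).get? "block_time")) = true
  · simp [h]
  · simp [h]

theorem fold_app {α : Type} (f : α → Option Int) (xs : List α) (acc : List Int) :
    xs.foldl (fun acc tx => match f tx with | some t => acc ++ [t] | none => acc) acc
      = acc ++ xs.filterMap f := by
  induction xs generalizing acc with
  | nil => simp
  | cons x rest ih =>
    simp only [List.foldl_cons, List.filterMap_cons]
    cases f x with
    | none => exact ih acc
    | some t => simp [ih]

-- in a ≤-sorted list every member is ≤ the last element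
theorem mem_le_getLast (l : List Int) (h : l.Pairwise (· ≤ ·)) (y : Int) (hy : y ∈ l)
    (hne : l ≠ []) : y ≤ l.getLast hne := by
  induction l with
  | nil => cases hy
  | cons x rest ih =>
    cases rest with
    | nil => simp at hy; simp [hy]
    | cons z r =>
      rw [List.getLast_cons (by simp)]
      rcases List.mem_cons.mp hy with rfl | hy'
      · exact le_trans (List.rel_of_pairwise_cons h (List.getLast_mem _))
          (le_refl _)
      · exact ih (List.pairwise_cons.mp h).2 hy' (by simp)

-- ===== VERDICT (by name: the statement is the Claim_ definition above) =====
theorem extract_timestamps_py_spec : Claim_equal_extract_timestamps_py := by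
  intro txs _
  unfold Spec_extract_timestamps_py extract_timestamps_py extract_timestamps_py_alt
  rw [stepA_eq, fold_app]
  simp only [List.nil_append]
  cases h : txs.filterMap pvTs with
  | nil => rfl
  | cons x t =>
    have hperm := PySem.List.sorted_perm (x :: t) (fun y => y) false
    cases hs : PySem.List.sorted (x :: t) (fun y => y) with
    | nil => exact absurd ((PySem.List.sorted_eq_nil_iff (x :: t) (fun y => y) false).mp hs) (by simp)
    | cons m r =>
      simp only
      rw [PySem.List.min?_id_cons, PySem.List.max?_id_cons]
      have hminmem : t.foldl min x ∈ x :: t :=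
        PySem.List.min?_mem (PySem.List.min?_id_cons x t)
      have hmaxmem : t.foldl max x ∈ x :: t :=
        PySem.List.max?_mem (PySem.List.max?_id_cons x t)
      have hmin : ∀ y ∈ x :: t, t.foldl min x ≤ y :=
        PySem.List.min?_isMin (PySem.List.min?_id_cons x t)
      have hmax : ∀ y ∈ x :: t, y ≤ t.foldl max x :=
        PySem.List.max?_isMax (PySem.List.max?_id_cons x t)
      have hpw : (m :: r).Pairwise (fun a b : Int => a ≤ b) := by
        have := PySem.List.sorted_pairwise (x :: t) (fun y : Int => y)
        rw [hs] at this; exact this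
      have hmem_sorted : ∀ y : Int, y ∈ (m :: r) ↔ y ∈ x :: t := by
        intro y
        constructor
        · intro hy; rw [← hs] at hy
          exact (PySem.List.mem_sorted (x :: t) (fun y => y) false y).mp hy
        · intro hy; rw [← hs]
          exact (PySem.List.mem_sorted (x :: t) (fun y => y) false y).mpr hy
      -- head
      have hhead : m = t.foldl min x := by
        have h1 : m ≤ t.foldl min x :=
          PySem.List.key_head_sorted_le (x :: t) (fun y : Int => y) hs _ hminmem
        have h2 : t.foldl min x ≤ m := hmin m ((hmem_sorted m).mp (by simp))
        omega
      -- last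
      have hlastmem : (m :: r).getLast (by simp) ∈ (m :: r) := List.getLast_mem _
      have hlast : (m :: r).getLast (by simp) = t.foldl max x := by
        have h1 : (m :: r).getLast (by simp) ≤ t.foldl max x :=
          hmax _ ((hmem_sorted _).mp hlastmem)
        have h2 : t.foldl max x ≤ (m :: r).getLast (by simp) :=
          mem_le_getLast _ hpw _ ((hmem_sorted _).mpr hmaxmem) (by simp)
        omega
      simp only [List.head?_cons]
      rw [List.getLast?_eq_some_getLast (by simp)]
      subst hhead
      rw [hlast]
      simp
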